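-- pv_equiv track=rewrite | github.com/treyrem/Scientific-classification-problem | enhanced_classification_system.py | _find_best_match_internal
-- ===== SOURCE A (Python) =====
-- from typing import Dict, List, Tuple, Optional, Any, Set
--
-- def _find_best_match_internal(target: str, options: List[str]) -> str:
--     """Find best matching option from available categories (internal helper)"""
--     if not target or not options:
--         return options[0] if options else ""
--
--     target_lower = target.lower()
--
--     # Exact match (case-insensitive)
--     for option in options:
--         if target_lower == option.lower():
--             return option
--
--     # Substring match
--     for option in options:
--         if target_lower in option.lower() or option.lower() in target_lower:
--             return option
--
--     # Word overlap match
--     target_words = set(target_lower.split())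
--     best_match = options[0]
--     max_overlap = 0
--
--     for option in options:
--         option_words = set(option.lower().split())
--         overlap = len(target_words.intersection(option_words))
--         if overlap > max_overlap:
--             max_overlap = overlap
--             best_match = option
--
--     return best_match
-- ===== SOURCE B (Python) =====
-- def _find_best_match_internal(target: str, options: list) -> str:
--     """Single pass: rank every option by a (tier, overlap) key and keep the first strict maximum."""
--     if not options:
--         return ""
--     best = options[0]
--     if not target:
--         return best
--     tl = target.lower()
--     tw = set(tl.split())
--
--     def key(o):
--         ol = o.lower()
--         if tl == ol:
--             return (2, 0)
--         if tl in ol or ol in tl: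
--             return (1, 0)
--         return (0, len(tw & set(ol.split())))
--
--     best_key = key(best)
--     for o in options[1:]:
--         k = key(o)
--         if k > best_key:
--             best, best_key = o, k
--     return best
-- ===== Notes on version B (the rewrite author's own statement) =====
-- stated objective: alternative
-- what changed: Replaces A's three sequential scans (exact, substring, word-overlap) with a single pass that ranks each option by a (tier, overlap) priority key and keeps the first strict maximum.
import Mathlib
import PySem

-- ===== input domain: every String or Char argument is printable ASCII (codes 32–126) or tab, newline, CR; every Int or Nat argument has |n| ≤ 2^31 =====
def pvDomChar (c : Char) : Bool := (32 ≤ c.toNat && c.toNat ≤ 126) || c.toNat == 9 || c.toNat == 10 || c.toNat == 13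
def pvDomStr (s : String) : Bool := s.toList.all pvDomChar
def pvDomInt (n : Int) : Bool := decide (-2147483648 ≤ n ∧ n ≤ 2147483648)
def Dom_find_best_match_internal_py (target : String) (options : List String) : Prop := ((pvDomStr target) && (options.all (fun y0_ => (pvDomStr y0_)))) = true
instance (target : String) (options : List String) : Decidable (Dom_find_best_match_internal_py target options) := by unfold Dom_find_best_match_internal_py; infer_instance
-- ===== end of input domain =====

-- B replaces A's three sequential scans with one pass keeping the first strict maximum of a (tier, word-overlap) key; alternative decomposition, same cost.


-- ===== PORT A =====
def find_best_match_internal_py (target : String) (options : List String) : String :=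
  if target == "" || options.isEmpty then options.headD ""
  else
    let tl := PySem.Str.lower target
    match options.find? (fun option => tl == PySem.Str.lower option) with
    | some option => option
    | none =>
      match options.find? (fun option =>
          PySem.Str.isIn tl (PySem.Str.lower option) || PySem.Str.isIn (PySem.Str.lower option) tl) with
      | some option => option
      | none =>
        let target_words := PySem.Set.ofList (PySem.Str.split₀ tl)
        (options.foldl (fun (st : String × Int) option =>
            let option_words := PySem.Set.ofList (PySem.Str.split₀ (PySem.Str.lower option))
            let overlap := PySem.Set.len (PySem.Set.inter target_words option_words)
            if overlap > st.2 then (option, overlap) else st)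
          (options.headD "", 0)).1

-- ===== PORT B =====
-- priority key: tier 2 = exact (case-insensitive), tier 1 = substring either way, tier 0 with word overlap
def pvKey (tl o : String) : Nat × Int :=
  if tl == PySem.Str.lower o then (2, 0)
  else if PySem.Str.isIn tl (PySem.Str.lower o) || PySem.Str.isIn (PySem.Str.lower o) tl then (1, 0)
  else (0, PySem.Set.len (PySem.Set.inter (PySem.Set.ofList (PySem.Str.split₀ tl))
            (PySem.Set.ofList (PySem.Str.split₀ (PySem.Str.lower o)))))

-- Python tuple comparison k > best_key on Nat × Nat
def pvKeyGT (a b : Nat × Int) : Bool := b.1 < a.1 || (a.1 == b.1 && b.2 < a.2)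

def find_best_match_internal_py_alt (target : String) (options : List String) : String :=
  if options.isEmpty then ""
  else if target == "" then options.headD ""
  else
    let tl := PySem.Str.lower target
    ((options.drop 1).foldl (fun (st : String × (Nat × Int)) o =>
        let k := pvKey tl o
        if pvKeyGT k st.2 then (o, k) else st) (options.headD "", pvKey tl (options.headD ""))).1

-- ===== PRECONDITION & SPEC =====
def Spec_find_best_match_internal_py (target : String) (options : List String) (out : String) : Prop := out = find_best_match_internal_py_alt target options
instance (target : String) (options : List String) (out : String) : Decidable (Spec_find_best_match_internal_py target options out) := by unfold Spec_find_best_match_internal_py; infer_instance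

-- ===== CLAIM (what is proved, stated in full; the proofs are below) =====
def Claim_equal_find_best_match_internal_py : Prop := ∀ (target : String) (options : List String), Dom_find_best_match_internal_py target options → Spec_find_best_match_internal_py target options (find_best_match_internal_py target options)

-- ===== LEMMAS AND PROOFS =====

-- proof-side abbreviations for B's fold and A's overlap
def pvOvl (tl o : String) : Int :=
  PySem.Set.len (PySem.Set.inter (PySem.Set.ofList (PySem.Str.split₀ tl))
    (PySem.Set.ofList (PySem.Str.split₀ (PySem.Str.lower o))))

def pvFold (tl b : String) (xs : List String) : String :=
  (xs.foldl (fun (st : String × (Nat × Int)) o =>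
      let k := pvKey tl o
      if pvKeyGT k st.2 then (o, k) else st) (b, pvKey tl b)).1

lemma pvFold_cons (tl b x : String) (xs : List String) :
    pvFold tl b (x :: xs)
      = if pvKeyGT (pvKey tl x) (pvKey tl b) then pvFold tl x xs else pvFold tl b xs := by
  simp only [pvFold, List.foldl]
  split <;> rfl

lemma key_exact {tl o : String} (h : (tl == PySem.Str.lower o) = true) : pvKey tl o = (2, 0) := by
  simp [pvKey, h]

lemma key_sub {tl o : String} (h1 : (tl == PySem.Str.lower o) = false)
    (h2 : (PySem.Str.isIn tl (PySem.Str.lower o) || PySem.Str.isIn (PySem.Str.lower o) tl) = true) :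
    pvKey tl o = (1, 0) := by
  unfold pvKey; rw [if_neg (by simp [h1]), if_pos h2]

lemma key_plain {tl o : String} (h1 : (tl == PySem.Str.lower o) = false)
    (h2 : (PySem.Str.isIn tl (PySem.Str.lower o) || PySem.Str.isIn (PySem.Str.lower o) tl) = false) :
    pvKey tl o = (0, pvOvl tl o) := by
  unfold pvKey pvOvl; rw [if_neg (by simp [h1]), if_neg (by simpa using h2)]

lemma keyGT_key_two (tl x : String) : pvKeyGT (pvKey tl x) (2, 0) = false := by
  unfold pvKeyGT pvKey; split_ifs <;> simp

lemma keyGT_two_key {tl b : String} (hb : (tl == PySem.Str.lower b) = false) :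
    pvKeyGT (2, 0) (pvKey tl b) = true := by
  unfold pvKeyGT pvKey; rw [if_neg (by simp [hb])]; split_ifs <;> simp

lemma keyGT_key_one {tl x : String} (hx : (tl == PySem.Str.lower x) = false) :
    pvKeyGT (pvKey tl x) (1, 0) = false := by
  unfold pvKeyGT pvKey; rw [if_neg (by simp [hx])]; split_ifs <;> simp

-- C1: an exact seed is never beaten
lemma pvFold_exact {tl b : String} (hb : (tl == PySem.Str.lower b) = true) :
    ∀ xs, pvFold tl b xs = b := by
  intro xs
  induction xs with
  | nil => rfl
  | cons x xs ih =>
    rw [pvFold_cons, key_exact hb, keyGT_key_two, if_neg (by simp)]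
    exact ih

-- C2: with a non-exact seed, the first exact element of xs wins
lemma pvFold_first_exact {tl : String} :
    ∀ (xs : List String) (b e : String), (tl == PySem.Str.lower b) = false →
      xs.find? (fun o => tl == PySem.Str.lower o) = some e → pvFold tl b xs = e := by
  intro xs
  induction xs with
  | nil => intro b e _ h; simp at h
  | cons x xs ih =>
    intro b e hb hf
    by_cases hx : (tl == PySem.Str.lower x) = true
    · rw [List.find?_cons_of_pos (p := fun o => tl == PySem.Str.lower o) hx] at hf
      cases hf
      rw [pvFold_cons, key_exact hx, keyGT_two_key hb, if_pos rfl]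
      exact pvFold_exact hx xs
    · rw [Bool.not_eq_true] at hx
      rw [List.find?_cons_of_neg (p := fun o => tl == PySem.Str.lower o) (by simp [hx])] at hf
      rw [pvFold_cons]
      split
      · exact ih x e hx hf
      · exact ih b e hb hf

-- C3: a substring-tier seed is never beaten when no exact match follows
lemma pvFold_sub_self {tl : String} :
    ∀ (xs : List String) (b : String), (tl == PySem.Str.lower b) = false →
      (PySem.Str.isIn tl (PySem.Str.lower b) || PySem.Str.isIn (PySem.Str.lower b) tl) = true →
      (∀ x ∈ xs, (tl == PySem.Str.lower x) = false) →
      pvFold tl b xs = b := by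
  intro xs
  induction xs with
  | nil => intro b _ _ _; rfl
  | cons x xs ih =>
    intro b hb1 hb2 hall
    rw [pvFold_cons, key_sub hb1 hb2, keyGT_key_one (hall x (by simp)), if_neg (by simp)]
    exact ih b hb1 hb2 (fun y hy => hall y (by simp [hy]))

-- C4: with a tier-0 seed and no exact matches, the first substring element wins
lemma pvFold_first_sub {tl : String} :
    ∀ (xs : List String) (b s : String), (tl == PySem.Str.lower b) = false →
      (PySem.Str.isIn tl (PySem.Str.lower b) || PySem.Str.isIn (PySem.Str.lower b) tl) = false →
      (∀ x ∈ xs, (tl == PySem.Str.lower x) = false) →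
      xs.find? (fun o => PySem.Str.isIn tl (PySem.Str.lower o) || PySem.Str.isIn (PySem.Str.lower o) tl) = some s →
      pvFold tl b xs = s := by
  intro xs
  induction xs with
  | nil => intro b s _ _ _ h; simp at h
  | cons x xs ih =>
    intro b s hb1 hb2 hall hf
    have hx1 : (tl == PySem.Str.lower x) = false := hall x (by simp)
    by_cases hx2 : (PySem.Str.isIn tl (PySem.Str.lower x) || PySem.Str.isIn (PySem.Str.lower x) tl) = true
    · rw [List.find?_cons_of_pos (p := fun o => PySem.Str.isIn tl (PySem.Str.lower o) || PySem.Str.isIn (PySem.Str.lower o) tl) hx2] at hf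
      cases hf
      rw [pvFold_cons, key_sub hx1 hx2, key_plain hb1 hb2, if_pos (by simp [pvKeyGT])]
      exact pvFold_sub_self xs x hx1 hx2 (fun y hy => hall y (by simp [hy]))
    · rw [Bool.not_eq_true] at hx2
      rw [List.find?_cons_of_neg (p := fun o => PySem.Str.isIn tl (PySem.Str.lower o) || PySem.Str.isIn (PySem.Str.lower o) tl) (by simpa using hx2)] at hf
      rw [pvFold_cons]
      split
      · exact ih x s hx1 hx2 (fun y hy => hall y (by simp [hy])) hf
      · exact ih b s hb1 hb2 (fun y hy => hall y (by simp [hy])) hf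

-- C5: when every element (seed included) is tier 0, B's fold is A's overlap fold
lemma pvFold_overlap {tl : String} :
    ∀ (xs : List String) (b : String), (tl == PySem.Str.lower b) = false →
      (PySem.Str.isIn tl (PySem.Str.lower b) || PySem.Str.isIn (PySem.Str.lower b) tl) = false →
      (∀ x ∈ xs, (tl == PySem.Str.lower x) = false ∧
        (PySem.Str.isIn tl (PySem.Str.lower x) || PySem.Str.isIn (PySem.Str.lower x) tl) = false) →
      (xs.foldl (fun (st : String × Int) o =>
          if pvOvl tl o > st.2 then (o, pvOvl tl o) else st) (b, pvOvl tl b)).1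
        = pvFold tl b xs := by
  intro xs
  induction xs with
  | nil => intro b _ _ _; rfl
  | cons x xs ih =>
    intro b hb1 hb2 hall
    obtain ⟨hx1, hx2⟩ := hall x (by simp)
    rw [pvFold_cons, key_plain hx1 hx2, key_plain hb1 hb2]
    simp only [List.foldl]
    have hrest : ∀ y ∈ xs, (tl == PySem.Str.lower y) = false ∧
        (PySem.Str.isIn tl (PySem.Str.lower y) || PySem.Str.isIn (PySem.Str.lower y) tl) = false :=
      fun y hy => hall y (by simp [hy])
    by_cases h : pvOvl tl x > pvOvl tl b
    · rw [if_pos h, if_pos (by simp [pvKeyGT, h])]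
      exact ih x hx1 hx2 hrest
    · rw [if_neg h, if_neg (by simp [pvKeyGT]; omega)]
      exact ih b hb1 hb2 hrest

-- the A-side fold's first step turns the (b, 0) seed into (b, pvOvl tl b)
lemma aFold_seed (tl b : String) (xs : List String) :
    ((b :: xs).foldl (fun (st : String × Int) o =>
        if pvOvl tl o > st.2 then (o, pvOvl tl o) else st) (b, 0))
      = (xs.foldl (fun (st : String × Int) o =>
        if pvOvl tl o > st.2 then (o, pvOvl tl o) else st) (b, pvOvl tl b)) := by
  simp only [List.foldl]
  by_cases h : pvOvl tl b > 0
  · rw [if_pos h]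
  · rw [if_neg h]
    have h0 : 0 ≤ pvOvl tl b := by unfold pvOvl; simp [PySem.Set.len]
    have : pvOvl tl b = 0 := by omega
    rw [this]

-- ===== VERDICT (by name: the statement is the Claim_ definition above) =====
theorem find_best_match_internal_py_spec : Claim_equal_find_best_match_internal_py := by
  intro target options _
  unfold Spec_find_best_match_internal_py
  simp only [find_best_match_internal_py, find_best_match_internal_py_alt]
  cases options with
  | nil => simp
  | cons h t =>
    by_cases ht : (target == "") = true
    · simp [ht]
    · rw [Bool.not_eq_true] at ht
      rw [if_neg (by simp [ht]), if_neg (by simp), if_neg (by simp [ht])]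
      simp only [List.headD_cons, List.drop_succ_cons, List.drop_zero]
      cases hfe : (h :: t).find? (fun option => PySem.Str.lower target == PySem.Str.lower option) with
      | some e =>
        by_cases hh : (PySem.Str.lower target == PySem.Str.lower h) = true
        · rw [List.find?_cons_of_pos (p := fun option => PySem.Str.lower target == PySem.Str.lower option) hh] at hfe
          cases hfe
          exact (pvFold_exact hh t).symm
        · rw [Bool.not_eq_true] at hh
          rw [List.find?_cons_of_neg (p := fun option => PySem.Str.lower target == PySem.Str.lower option) (by simp [hh])] at hfe
          exact (pvFold_first_exact t h e hh hfe).symm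
      | none =>
        have hne := List.find?_eq_none.mp hfe
        have hneh : (PySem.Str.lower target == PySem.Str.lower h) = false := by
          have := hne h (by simp); simpa using this
        have hnet : ∀ x ∈ t, (PySem.Str.lower target == PySem.Str.lower x) = false := by
          intro x hx; have := hne x (by simp [hx]); simpa using this
        cases hfs : (h :: t).find? (fun option =>
            PySem.Str.isIn (PySem.Str.lower target) (PySem.Str.lower option) ||
              PySem.Str.isIn (PySem.Str.lower option) (PySem.Str.lower target)) with
        | some s =>
          by_cases hh : (PySem.Str.isIn (PySem.Str.lower target) (PySem.Str.lower h) ||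
              PySem.Str.isIn (PySem.Str.lower h) (PySem.Str.lower target)) = true
          · rw [List.find?_cons_of_pos (p := fun option => PySem.Str.isIn (PySem.Str.lower target) (PySem.Str.lower option) || PySem.Str.isIn (PySem.Str.lower option) (PySem.Str.lower target)) hh] at hfs
            cases hfs
            exact (pvFold_sub_self t h hneh hh hnet).symm
          · rw [Bool.not_eq_true] at hh
            rw [List.find?_cons_of_neg (p := fun option => PySem.Str.isIn (PySem.Str.lower target) (PySem.Str.lower option) || PySem.Str.isIn (PySem.Str.lower option) (PySem.Str.lower target)) (by simpa using hh)] at hfs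
            exact (pvFold_first_sub t h s hneh hh hnet hfs).symm
        | none =>
          have hns := List.find?_eq_none.mp hfs
          have hnsh : (PySem.Str.isIn (PySem.Str.lower target) (PySem.Str.lower h) ||
              PySem.Str.isIn (PySem.Str.lower h) (PySem.Str.lower target)) = false := by
            have := hns h (by simp); simpa using this
          have hnst : ∀ x ∈ t, (PySem.Str.isIn (PySem.Str.lower target) (PySem.Str.lower x) ||
              PySem.Str.isIn (PySem.Str.lower x) (PySem.Str.lower target)) = false := by
            intro x hx; have := hns x (by simp [hx]); simpa using this
          have hO := pvFold_overlap t h hneh hnsh (fun x hx => ⟨hnet x hx, hnst x hx⟩)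
          have hA : (((h :: t).foldl (fun (st : String × Int) o =>
              if pvOvl (PySem.Str.lower target) o > st.2 then (o, pvOvl (PySem.Str.lower target) o) else st)
              (h, 0)).1 : String) = pvFold (PySem.Str.lower target) h t := by
            rw [aFold_seed]; exact hO
          exact hA
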